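-- pv_equiv track=rewrite | github.com/quantmew/ripperdoc | ripperdoc/tools/lsp_tool.py | _extract_symbol_at_position
-- ===== SOURCE A (Python) =====
-- from typing import Any, AsyncGenerator, Dict, List, Optional, Tuple, Literal
--
-- def _extract_symbol_at_position(line_text: str, char_index: int) -> Optional[str]:
--     if not line_text:
--         return None
--     if char_index >= len(line_text):
--         char_index = len(line_text) - 1
--     if char_index < 0:
--         return None
--
--     if not line_text[char_index].isalnum() and line_text[char_index] != "_":
--         if char_index > 0 and (line_text[char_index - 1].isalnum() or line_text[char_index - 1] == "_"):
--             char_index -= 1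
--         else:
--             return None
--
--     start = char_index
--     while start > 0 and (line_text[start - 1].isalnum() or line_text[start - 1] == "_"):
--         start -= 1
--     end = char_index
--     while end + 1 < len(line_text) and (line_text[end + 1].isalnum() or line_text[end + 1] == "_"):
--         end += 1
--     symbol = line_text[start : end + 1].strip()
--     return symbol or None
-- ===== SOURCE B (Python) =====
-- from typing import Optional
--
--
-- def _is_word(c: str) -> bool:
--     return c.isalnum() or c == "_"
--
--
-- def _word_spans(line_text: str) -> list:
--     """One forward pass: half-open (start, end) spans of maximal word-character runs."""
--     spans = []
--     start = None
--     for i in range(len(line_text)):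
--         if _is_word(line_text[i]):
--             if start is None:
--                 start = i
--         else:
--             if start is not None:
--                 spans.append((start, i))
--                 start = None
--     if start is not None:
--         spans.append((start, len(line_text)))
--     return spans
--
--
-- def _extract_symbol_at_position(line_text: str, char_index: int) -> Optional[str]:
--     n = len(line_text)
--     if n == 0:
--         return None
--     idx = min(char_index, n - 1)
--     if idx < 0:
--         return None
--     if not _is_word(line_text[idx]):
--         if idx > 0 and _is_word(line_text[idx - 1]):
--             idx -= 1
--         else:
--             return None
--     for start, end in _word_spans(line_text):
--         if start <= idx < end:
--             return line_text[start:end]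
--     return None
-- ===== Notes on version B (the rewrite author's own statement) =====
-- stated objective: alternative
-- what changed: A widens the symbol by two in-place while-loop scans (left and right) from the cursor; B instead tokenizes the whole line in one forward pass into maximal word-character (start, end) spans and returns the span containing the (clamped and left-adjusted) cursor index.
import Mathlib
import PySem

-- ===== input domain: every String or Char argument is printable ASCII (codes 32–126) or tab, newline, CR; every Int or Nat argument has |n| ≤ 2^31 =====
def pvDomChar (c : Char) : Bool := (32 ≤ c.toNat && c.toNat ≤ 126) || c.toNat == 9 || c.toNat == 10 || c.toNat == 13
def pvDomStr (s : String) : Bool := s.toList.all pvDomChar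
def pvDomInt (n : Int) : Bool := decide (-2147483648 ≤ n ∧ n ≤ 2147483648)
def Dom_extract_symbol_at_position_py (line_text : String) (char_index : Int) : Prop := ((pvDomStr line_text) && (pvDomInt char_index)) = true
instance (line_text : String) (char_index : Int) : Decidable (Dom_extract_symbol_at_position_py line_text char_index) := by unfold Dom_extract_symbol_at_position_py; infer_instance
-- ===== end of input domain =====

-- B replaces A's two in-place while-loop scans by a one-pass tokenization of the whole
-- line into maximal word-character spans followed by a span lookup (objective: alternative).


-- ===== PORT A =====
-- c.isalnum() or c == '_' (the character test both Pythons use)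
def pvIsW (c : Char) : Bool := PySem.Chars.isalnum c || c == '_'

-- A's `while start > 0 and is_word(line_text[start-1]): start -= 1` (structural recursion on start;
-- cs.getD is exact because the accessed index is always in range)
def pvGoLeft (cs : List Char) : Nat → Nat
  | 0 => 0
  | s+1 => if pvIsW (cs.getD s ' ') then pvGoLeft cs s else s + 1

-- A's `while end+1 < len(line_text) and is_word(line_text[end+1]): end += 1` (fuel cs.length always suffices)
def pvGoRight (cs : List Char) : Nat → Nat → Nat
  | 0, e => e
  | f+1, e => if decide (e + 1 < cs.length) && pvIsW (cs.getD (e+1) ' ') then pvGoRight cs f (e+1) else e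

def extract_symbol_at_position_py (line_text : String) (char_index : Int) : Option String :=
  let cs := line_text.toList
  if cs.length = 0 then none
  else
    let ci : Int := if char_index ≥ (cs.length : Int) then (cs.length : Int) - 1 else char_index
    if ci < 0 then none
    else
      -- here 0 ≤ ci < cs.length, so ci.toNat is Python's index and getD is exact
      let i := ci.toNat
      let adj : Option Nat :=
        if !(pvIsW (cs.getD i ' ')) then
          if decide (0 < i) && pvIsW (cs.getD (i-1) ' ') then some (i-1) else none
        else some i
      match adj with
      | none => none
      | some j =>
        let s := pvGoLeft cs j
        let e := pvGoRight cs cs.length j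
        let symbol := PySem.Chars.strip (PySem.List.slice cs (some (s : Int)) (some ((e : Int) + 1)))
        if symbol.isEmpty then none else some (String.ofList symbol)

-- ===== PORT B =====
-- one step of Source B's tokenization loop body (state: closed spans so far, start of the open run)
def pvSpanStep (cs : List Char) (acc : List (Nat × Nat) × Option Nat) (i : Nat) :
    List (Nat × Nat) × Option Nat :=
  if pvIsW (cs.getD i ' ') then
    match acc.2 with
    | none => (acc.1, some i)
    | some a => (acc.1, some a)
  else
    match acc.2 with
    | some a => (acc.1 ++ [(a, i)], none)
    | none => (acc.1, none)

-- Source B's _word_spans: one forward pass, maximal word runs as half-open (start, end) spans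
def pvWordSpans (cs : List Char) : List (Nat × Nat) :=
  match (List.range cs.length).foldl (pvSpanStep cs) ([], none) with
  | (sp, some a) => sp ++ [(a, cs.length)]
  | (sp, none) => sp

def extract_symbol_at_position_py_alt (line_text : String) (char_index : Int) : Option String :=
  let cs := line_text.toList
  let n := cs.length
  if n = 0 then none
  else
    let idx0 : Int := min char_index ((n : Int) - 1)
    if idx0 < 0 then none
    else
      let i := idx0.toNat
      let adj : Option Nat :=
        if pvIsW (cs.getD i ' ') then some i
        else if decide (0 < i) && pvIsW (cs.getD (i-1) ' ') then some (i-1)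
        else none
      match adj with
      | none => none
      | some j =>
        match (pvWordSpans cs).find? (fun p => decide (p.1 ≤ j) && decide (j < p.2)) with
        | some p => some (String.ofList (PySem.List.slice cs (some (p.1 : Int)) (some (p.2 : Int))))
        | none => none

-- ===== PRECONDITION & SPEC =====
def Spec_extract_symbol_at_position_py (line_text : String) (char_index : Int) (out : Option String) : Prop := out = extract_symbol_at_position_py_alt line_text char_index
instance (line_text : String) (char_index : Int) (out : Option String) : Decidable (Spec_extract_symbol_at_position_py line_text char_index out) := by unfold Spec_extract_symbol_at_position_py; infer_instance

-- ===== CLAIM (what is proved, stated in full; the proofs are below) =====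
def Claim_equal_extract_symbol_at_position_py : Prop := ∀ (line_text : String) (char_index : Int), Dom_extract_symbol_at_position_py line_text char_index → Spec_extract_symbol_at_position_py line_text char_index (extract_symbol_at_position_py line_text char_index)

-- ===== LEMMAS AND PROOFS =====

-- a word character is never Python-whitespace (isalpha/isdigit are ASCII ranges, '_' is 95)
lemma pvIsW_not_space (c : Char) (h : pvIsW c = true) : PySem.Chars.isspace c = false := by
  have hv : c.val.toNat = c.toNat := rfl
  have h95 : c = '_' → c.toNat = 95 := fun hh => by rw [hh]; rfl
  have e1 : ('A' : Char).val.toNat = 65 := rfl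
  have e2 : ('Z' : Char).val.toNat = 90 := rfl
  have e3 : ('a' : Char).val.toNat = 97 := rfl
  have e4 : ('z' : Char).val.toNat = 122 := rfl
  have e5 : ('0' : Char).val.toNat = 48 := rfl
  have e6 : ('9' : Char).val.toNat = 57 := rfl
  unfold pvIsW PySem.Chars.isalnum PySem.Chars.isalpha PySem.Chars.isdigit PySem.Chars.isupper PySem.Chars.islower at h
  simp only [Bool.or_eq_true, Bool.and_eq_true, decide_eq_true_eq, beq_iff_eq,
    Char.le_def, UInt32.le_iff_toNat_le] at h
  have key : (65 ≤ c.toNat ∧ c.toNat ≤ 90) ∨ (97 ≤ c.toNat ∧ c.toNat ≤ 122) ∨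
      (48 ≤ c.toNat ∧ c.toNat ≤ 57) ∨ c.toNat = 95 := by
    rcases h with ((h1|h2)|h3)|h4
    · exact Or.inl (by omega)
    · exact Or.inr (Or.inl (by omega))
    · exact Or.inr (Or.inr (Or.inl (by omega)))
    · exact Or.inr (Or.inr (Or.inr (h95 h4)))
  rw [Bool.eq_false_iff, ne_eq]
  intro hsp
  unfold PySem.Chars.isspace at hsp
  simp only [Bool.or_eq_true, Bool.and_eq_true, decide_eq_true_eq] at hsp
  omega

lemma pvDropWhile_eq_self {α : Type} (P : α → Bool) (l : List α) (h : ∀ c ∈ l, P c = false) :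
    List.dropWhile P l = l := by
  cases l with
  | nil => rfl
  | cons a t => simp [List.dropWhile, h a (by simp)]

lemma pvStrip_eq_self (l : List Char) (h : ∀ c ∈ l, PySem.Chars.isspace c = false) :
    PySem.Chars.strip l = l := by
  unfold PySem.Chars.strip PySem.Chars.lstrip PySem.Chars.rstrip
  rw [pvDropWhile_eq_self _ _ h]
  rw [pvDropWhile_eq_self _ _ (fun c hc => h c (List.mem_reverse.mp hc))]
  exact List.reverse_reverse l

-- spec of A's left scan
lemma pvGoLeft_spec (cs : List Char) (i : Nat) :
    pvGoLeft cs i ≤ i ∧ (∀ j, pvGoLeft cs i ≤ j → j < i → pvIsW (cs.getD j ' ') = true) ∧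
      (pvGoLeft cs i = 0 ∨ pvIsW (cs.getD (pvGoLeft cs i - 1) ' ') = false) := by
  induction i with
  | zero => simp [pvGoLeft]
  | succ s ih =>
    by_cases hW : pvIsW (cs.getD s ' ') = true
    · obtain ⟨h1, h2, h3⟩ := ih
      refine ⟨?_, ?_, ?_⟩ <;> simp only [pvGoLeft, hW, if_pos]
      · omega
      · intro j hj1 hj2
        by_cases hjs : j < s
        · exact h2 j hj1 hjs
        · have hjeq : j = s := by omega
          rw [hjeq]; exact hW
      · exact h3
    · have hW2 : pvIsW (cs[s]?.getD ' ') = false := by simpa using hW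
      have hred : pvGoLeft cs (s+1) = s + 1 := by simp [pvGoLeft, hW2]
      rw [hred]
      exact ⟨le_refl _, fun j hj1 hj2 => by omega, Or.inr (by simpa using hW)⟩

-- spec of A's right scan (fuel f suffices when cs.length ≤ f + e)
lemma pvGoRight_spec (cs : List Char) (f : Nat) : ∀ e, cs.length ≤ f + e →
    e ≤ pvGoRight cs f e ∧
    (∀ j, e < j → j ≤ pvGoRight cs f e → j < cs.length ∧ pvIsW (cs.getD j ' ') = true) ∧
    (pvGoRight cs f e + 1 < cs.length → pvIsW (cs.getD (pvGoRight cs f e + 1) ' ') = false) ∧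
    (e < cs.length → pvGoRight cs f e < cs.length) := by
  induction f with
  | zero =>
    intro e he
    simp only [pvGoRight]
    exact ⟨le_refl _, fun j h1 h2 => by omega, fun h => by omega, fun h => h⟩
  | succ f ih =>
    intro e he
    by_cases hc : (decide (e + 1 < cs.length) && pvIsW (cs.getD (e+1) ' ')) = true
    · simp only [pvGoRight, hc, if_pos]
      obtain ⟨h1, h2, h3, h4⟩ := ih (e+1) (by omega)
      simp only [Bool.and_eq_true, decide_eq_true_eq] at hc
      refine ⟨by omega, ?_, h3, fun _ => h4 hc.1⟩
      intro j hj1 hj2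
      by_cases hje : e + 1 < j
      · exact h2 j hje hj2
      · have hjeq : j = e + 1 := by omega
        rw [hjeq]; exact ⟨hc.1, hc.2⟩
    · have hred : pvGoRight cs (f+1) e = e := by simp only [pvGoRight, hc, if_neg]; simp [hc]
      rw [hred]
      simp only [Bool.and_eq_true, decide_eq_true_eq, not_and, Bool.not_eq_true] at hc
      refine ⟨le_refl _, fun j hj1 hj2 => by omega, fun h => hc (by omega), fun h => h⟩

-- a maximal run of word characters
def pvMaxRun (cs : List Char) (a b : Nat) : Prop :=
  a < b ∧ b ≤ cs.length ∧ (∀ j, a ≤ j → j < b → pvIsW (cs.getD j ' ') = true) ∧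
    (a = 0 ∨ pvIsW (cs.getD (a-1) ' ') = false) ∧
    (b = cs.length ∨ pvIsW (cs.getD b ' ') = false)

lemma pvMaxRun_unique (cs : List Char) (a b a' b' j : Nat)
    (h : pvMaxRun cs a b) (h' : pvMaxRun cs a' b')
    (hj : a ≤ j ∧ j < b) (hj' : a' ≤ j ∧ j < b') : a = a' ∧ b = b' := by
  obtain ⟨hab, hbn, hint, hl, hr⟩ := h
  obtain ⟨hab', hbn', hint', hl', hr'⟩ := h'
  have ha : a = a' := by
    by_contra hne
    rcases Nat.lt_or_ge a a' with hlt | hge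
    · have hWx : pvIsW (cs.getD (a'-1) ' ') = true := hint (a'-1) (by omega) (by omega)
      rcases hl' with h0 | hF
      · omega
      · rw [hF] at hWx; cases hWx
    · have hlt : a' < a := by omega
      have hWx : pvIsW (cs.getD (a-1) ' ') = true := hint' (a-1) (by omega) (by omega)
      rcases hl with h0 | hF
      · omega
      · rw [hF] at hWx; cases hWx
  have hb : b = b' := by
    by_contra hne
    rcases Nat.lt_or_ge b b' with hlt | hge
    · have hWx : pvIsW (cs.getD b ' ') = true := hint' b (by omega) (by omega)
      rcases hr with h0 | hF
      · omega
      · rw [hF] at hWx; cases hWx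
    · have hlt : b' < b := by omega
      have hWx : pvIsW (cs.getD b' ' ') = true := hint b' (by omega) (by omega)
      rcases hr' with h0 | hF
      · omega
      · rw [hF] at hWx; cases hWx
  exact ⟨ha, hb⟩

-- invariant of Source B's tokenization loop after processing positions [0, k)
def pvInv (cs : List Char) (k : Nat) (st : List (Nat × Nat) × Option Nat) : Prop :=
  (∀ p ∈ st.1, pvMaxRun cs p.1 p.2 ∧ p.2 < k) ∧
  (∀ a, st.2 = some a → a < k ∧ (∀ j, a ≤ j → j < k → pvIsW (cs.getD j ' ') = true) ∧
    (a = 0 ∨ pvIsW (cs.getD (a-1) ' ') = false)) ∧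
  (∀ j, j < k → pvIsW (cs.getD j ' ') = true →
    (∃ p ∈ st.1, p.1 ≤ j ∧ j < p.2) ∨ (∃ a, st.2 = some a ∧ a ≤ j))

lemma pvInv_step (cs : List Char) (k : Nat) (st : List (Nat × Nat) × Option Nat)
    (hk : k < cs.length) (h : pvInv cs k st) : pvInv cs (k+1) (pvSpanStep cs st k) := by
  obtain ⟨hC, hO, hCov⟩ := h
  by_cases hW : pvIsW (cs.getD k ' ') = true
  · cases hso : st.2 with
    | none =>
      have hW' : pvIsW (cs[k]?.getD ' ') = true := hW
      have hstep : pvSpanStep cs st k = (st.1, some k) := by simp [pvSpanStep, hW', hso]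
      rw [hstep]
      refine ⟨fun p hp => ⟨(hC p hp).1, by have := (hC p hp).2; omega⟩, ?_, ?_⟩
      · intro a ha
        have ha' : k = a := by simpa using ha
        subst ha'
        refine ⟨Nat.lt_succ_self k, fun j hj1 hj2 => ?_, ?_⟩
        · have hjk : j = k := by omega
          rw [hjk]; exact hW
        · by_cases hk0 : k = 0
          · exact Or.inl hk0
          · by_cases hW1 : pvIsW (cs.getD (k-1) ' ') = true
            · rcases hCov (k-1) (by omega) hW1 with ⟨p, hp, hps⟩ | ⟨a', ha', _⟩
              · exact absurd hps.2 (by have := (hC p hp).2; omega)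
              · rw [hso] at ha'; exact absurd ha' (by simp)
            · exact Or.inr (by simpa using hW1)
      · intro j hj hWj
        by_cases hjk : j < k
        · rcases hCov j hjk hWj with ⟨p, hp, hps⟩ | ⟨a', ha', _⟩
          · exact Or.inl ⟨p, hp, hps⟩
          · rw [hso] at ha'; exact absurd ha' (by simp)
        · exact Or.inr ⟨k, rfl, by omega⟩
    | some a0 =>
      have hW' : pvIsW (cs[k]?.getD ' ') = true := hW
      have hstep : pvSpanStep cs st k = (st.1, some a0) := by simp [pvSpanStep, hW', hso]
      rw [hstep]
      obtain ⟨ha1, ha2, ha3⟩ := hO a0 hso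
      refine ⟨fun p hp => ⟨(hC p hp).1, by have := (hC p hp).2; omega⟩, ?_, ?_⟩
      · intro a ha
        have ha' : a0 = a := by simpa using ha
        subst ha'
        refine ⟨by omega, fun j hj1 hj2 => ?_, ha3⟩
        by_cases hjk : j < k
        · exact ha2 j hj1 hjk
        · have hjeq : j = k := by omega
          rw [hjeq]; exact hW
      · intro j hj hWj
        by_cases hjk : j < k
        · rcases hCov j hjk hWj with ⟨p, hp, hps⟩ | ⟨a', ha', hle⟩
          · exact Or.inl ⟨p, hp, hps⟩
          · rw [hso] at ha'
            have : a0 = a' := by simpa using ha'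
            exact Or.inr ⟨a0, rfl, by omega⟩
        · exact Or.inr ⟨a0, rfl, by omega⟩
  · have hWf : pvIsW (cs.getD k ' ') = false := by simpa using hW
    cases hso : st.2 with
    | some a0 =>
      have hWf' : pvIsW (cs[k]?.getD ' ') = false := hWf
      have hstep : pvSpanStep cs st k = (st.1 ++ [(a0, k)], none) := by simp [pvSpanStep, hWf', hso]
      rw [hstep]
      obtain ⟨ha1, ha2, ha3⟩ := hO a0 hso
      refine ⟨?_, by simp, ?_⟩
      · intro p hp
        rcases List.mem_append.mp hp with hp | hp
        · exact ⟨(hC p hp).1, by have := (hC p hp).2; omega⟩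
        · have hpe : p = (a0, k) := by simpa using hp
          rw [hpe]
          exact ⟨⟨ha1, by omega, ha2, ha3, Or.inr hWf⟩, by omega⟩
      · intro j hj hWj
        by_cases hjk : j < k
        · rcases hCov j hjk hWj with ⟨p, hp, hps⟩ | ⟨a', ha', hle⟩
          · exact Or.inl ⟨p, List.mem_append.mpr (Or.inl hp), hps⟩
          · rw [hso] at ha'
            have haa : a0 = a' := by simpa using ha'
            refine Or.inl ⟨(a0, k), List.mem_append.mpr (Or.inr (by simp)), by constructor <;> omega⟩
        · have hjeq : j = k := by omega
          rw [hjeq] at hWj; rw [hWj] at hWf; cases hWf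
    | none =>
      have hWf' : pvIsW (cs[k]?.getD ' ') = false := hWf
      have hstep : pvSpanStep cs st k = (st.1, none) := by simp [pvSpanStep, hWf', hso]
      rw [hstep]
      refine ⟨fun p hp => ⟨(hC p hp).1, by have := (hC p hp).2; omega⟩, by simp, ?_⟩
      intro j hj hWj
      by_cases hjk : j < k
      · rcases hCov j hjk hWj with ⟨p, hp, hps⟩ | ⟨a', ha', _⟩
        · exact Or.inl ⟨p, hp, hps⟩
        · rw [hso] at ha'; exact absurd ha' (by simp)
      · have hjeq : j = k := by omega
        rw [hjeq] at hWj; rw [hWj] at hWf; cases hWf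

lemma pvInv_fold (cs : List Char) (k : Nat) (hk : k ≤ cs.length) :
    pvInv cs k ((List.range k).foldl (pvSpanStep cs) ([], none)) := by
  induction k with
  | zero =>
    exact ⟨by simp, by simp, fun j hj _ => absurd hj (by omega)⟩
  | succ k ih =>
    rw [List.range_succ, List.foldl_append]
    exact pvInv_step cs k _ (by omega) (ih (by omega))

-- every span Source B produces is a maximal run, and every word position is covered by one
lemma pvWordSpans_props (cs : List Char) :
    (∀ p ∈ pvWordSpans cs, pvMaxRun cs p.1 p.2) ∧
    (∀ j, j < cs.length → pvIsW (cs.getD j ' ') = true →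
      ∃ p ∈ pvWordSpans cs, p.1 ≤ j ∧ j < p.2) := by
  have hinv := pvInv_fold cs cs.length (le_refl _)
  obtain ⟨hC, hO, hCov⟩ := hinv
  rcases hr : (List.range cs.length).foldl (pvSpanStep cs) ([], none) with ⟨sp, so⟩
  rw [hr] at hC hO hCov
  cases so with
  | some a =>
    obtain ⟨ha1, ha2, ha3⟩ := hO a rfl
    have hws : pvWordSpans cs = sp ++ [(a, cs.length)] := by
      unfold pvWordSpans; rw [hr]
    rw [hws]
    constructor
    · intro p hp
      rcases List.mem_append.mp hp with hp | hp
      · exact (hC p hp).1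
      · have hpe : p = (a, cs.length) := by simpa using hp
        rw [hpe]
        exact ⟨ha1, le_refl _, ha2, ha3, Or.inl rfl⟩
    · intro j hj hWj
      rcases hCov j hj hWj with ⟨p, hp, hps⟩ | ⟨a', ha', hle⟩
      · exact ⟨p, List.mem_append.mpr (Or.inl hp), hps⟩
      · have haa : a = a' := by simpa using ha'
        exact ⟨(a, cs.length), List.mem_append.mpr (Or.inr (by simp)),
          by constructor <;> simp <;> omega⟩
  | none =>
    have hws : pvWordSpans cs = sp := by
      unfold pvWordSpans; rw [hr]
    rw [hws]
    constructor
    · intro p hp; exact (hC p hp).1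
    · intro j hj hWj
      rcases hCov j hj hWj with ⟨p, hp, hps⟩ | ⟨a', ha', _⟩
      · exact ⟨p, hp, hps⟩
      · exact absurd ha' (by simp)

-- the span Source B's lookup finds is exactly the run A's two scans delimit
lemma pvFind_span (cs : List Char) (j : Nat) (hj : j < cs.length)
    (hW : pvIsW (cs.getD j ' ') = true) :
    (pvWordSpans cs).find? (fun p => decide (p.1 ≤ j) && decide (j < p.2)) =
      some (pvGoLeft cs j, pvGoRight cs cs.length j + 1) := by
  obtain ⟨hmax, hcov⟩ := pvWordSpans_props cs
  obtain ⟨p0, hp0, hp0j⟩ := hcov j hj hW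
  have hsome : ((pvWordSpans cs).find? (fun p => decide (p.1 ≤ j) && decide (j < p.2))).isSome := by
    rw [List.find?_isSome]
    exact ⟨p0, hp0, by simp [hp0j.1, hp0j.2]⟩
  obtain ⟨q, hq⟩ := Option.isSome_iff_exists.mp hsome
  have hqmem := List.mem_of_find?_eq_some hq
  have hqpred := List.find?_some hq
  simp only [Bool.and_eq_true, decide_eq_true_eq] at hqpred
  obtain ⟨hl1, hl2, hl3⟩ := pvGoLeft_spec cs j
  obtain ⟨hr1, hr2, hr3, hr4⟩ := pvGoRight_spec cs cs.length j (by omega)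
  have hmr : pvMaxRun cs (pvGoLeft cs j) (pvGoRight cs cs.length j + 1) := by
    refine ⟨by omega, by have := hr4 hj; omega, ?_, hl3, ?_⟩
    · intro m hm1 hm2
      rcases Nat.lt_trichotomy m j with hlt | heq | hgt
      · exact hl2 m hm1 hlt
      · rw [heq]; exact hW
      · exact (hr2 m hgt (by omega)).2
    · by_cases hb : pvGoRight cs cs.length j + 1 < cs.length
      · exact Or.inr (hr3 hb)
      · have := hr4 hj; exact Or.inl (by omega)
  have huq := pvMaxRun_unique cs q.1 q.2 (pvGoLeft cs j) (pvGoRight cs cs.length j + 1) j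
    (hmax q hqmem) hmr ⟨hqpred.1, hqpred.2⟩ ⟨hl1, by omega⟩
  rw [hq]
  congr 1
  exact Prod.ext_iff.mpr ⟨huq.1, huq.2⟩

-- A's strip-and-test of the scanned run equals B's direct span slice
lemma pvFinal_branch (cs : List Char) (j : Nat) (hj : j < cs.length)
    (hW : pvIsW (cs.getD j ' ') = true) :
    (let s := pvGoLeft cs j
     let e := pvGoRight cs cs.length j
     let symbol := PySem.Chars.strip (PySem.List.slice cs (some (s : Int)) (some ((e : Int) + 1)))
     if symbol.isEmpty then none else some (String.ofList symbol)) =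
    some (String.ofList (PySem.List.slice cs (some ((pvGoLeft cs j : Nat) : Int))
      (some ((pvGoRight cs cs.length j + 1 : Nat) : Int)))) := by
  obtain ⟨hl1, hl2, hl3⟩ := pvGoLeft_spec cs j
  obtain ⟨hr1, hr2, hr3, hr4⟩ := pvGoRight_spec cs cs.length j (by omega)
  have hen : pvGoRight cs cs.length j < cs.length := hr4 hj
  have hcast : ((pvGoRight cs cs.length j : Nat) : Int) + 1 =
      ((pvGoRight cs cs.length j + 1 : Nat) : Int) := by push_cast; ring
  simp only [hcast, PySem.List.slice_natCast]
  set s := pvGoLeft cs j with hs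
  set e := pvGoRight cs cs.length j with he
  have hall : ∀ c ∈ (cs.drop s).take (e + 1 - s), pvIsW c = true := by
    intro c hc
    rw [List.mem_iff_getElem] at hc
    obtain ⟨m, hm, hmc⟩ := hc
    simp only [List.length_take, List.length_drop] at hm
    rw [List.getElem_take, List.getElem_drop] at hmc
    have hWm : pvIsW (cs.getD (s + m) ' ') = true := by
      rcases Nat.lt_trichotomy (s + m) j with hlt | heq | hgt
      · exact hl2 (s + m) (by omega) hlt
      · rw [heq]; exact hW
      · exact (hr2 (s + m) hgt (by omega)).2
    rw [List.getD_eq_getElem _ _ (by omega)] at hWm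
    rw [← hmc]
    exact hWm
  have hstrip : PySem.Chars.strip ((cs.drop s).take (e + 1 - s)) = (cs.drop s).take (e + 1 - s) :=
    pvStrip_eq_self _ (fun c hc => pvIsW_not_space c (hall c hc))
  have hne : ((cs.drop s).take (e + 1 - s)).isEmpty = false := by
    rw [List.isEmpty_eq_false_iff, ← List.length_pos_iff]
    simp only [List.length_take, List.length_drop]
    omega
  simp only [hstrip, hne]
  simp

-- both final branches, with the outer position plumbing already agreed on
lemma pvCombined (cs : List Char) (j : Nat) (hj : j < cs.length)
    (hW : pvIsW (cs.getD j ' ') = true) :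
    (let s := pvGoLeft cs j
     let e := pvGoRight cs cs.length j
     let symbol := PySem.Chars.strip (PySem.List.slice cs (some (s : Int)) (some ((e : Int) + 1)))
     if symbol.isEmpty then none else some (String.ofList symbol)) =
    (match (pvWordSpans cs).find? (fun p => decide (p.1 ≤ j) && decide (j < p.2)) with
     | some p => some (String.ofList (PySem.List.slice cs (some (p.1 : Int)) (some (p.2 : Int))))
     | none => (none : Option String)) := by
  rw [pvFind_span cs j hj hW]
  exact pvFinal_branch cs j hj hW

-- ===== VERDICT (by name: the statement is the Claim_ definition above) =====
theorem extract_symbol_at_position_py_spec : Claim_equal_extract_symbol_at_position_py := by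
  intro lt ci _
  unfold Spec_extract_symbol_at_position_py
  unfold extract_symbol_at_position_py extract_symbol_at_position_py_alt
  simp only []
  by_cases hn : lt.toList.length = 0
  · simp [hn]
  · rw [if_neg hn, if_neg hn]
    have hn' : 0 < lt.toList.length := Nat.pos_of_ne_zero hn
    have hmin : (if ci ≥ (lt.toList.length : Int) then (lt.toList.length : Int) - 1 else ci) =
        min ci ((lt.toList.length : Int) - 1) := by
      split <;> omega
    rw [hmin]
    by_cases hneg : min ci ((lt.toList.length : Int) - 1) < 0
    · rw [if_pos hneg, if_pos hneg]
    · rw [if_neg hneg, if_neg hneg]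
      have hin : (min ci ((lt.toList.length : Int) - 1)).toNat < lt.toList.length := by omega
      set i := (min ci ((lt.toList.length : Int) - 1)).toNat with hi
      by_cases hWi : pvIsW (lt.toList.getD i ' ') = true
      · simp only [hWi, Bool.not_true, Bool.false_eq_true, if_false, if_true]
        exact pvCombined lt.toList i hin hWi
      · have hWf : pvIsW (lt.toList.getD i ' ') = false := by simpa using hWi
        simp only [hWf, Bool.not_false, if_true, Bool.false_eq_true, if_false]
        by_cases hprev : (decide (0 < i) && pvIsW (lt.toList.getD (i-1) ' ')) = true
        · rw [if_pos hprev]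
          simp only [Bool.and_eq_true, decide_eq_true_eq] at hprev
          have hin' : i - 1 < lt.toList.length := by omega
          exact pvCombined lt.toList (i-1) hin' hprev.2
        · rw [if_neg hprev]
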